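-- pv_equiv track=rewrite | github.com/RFlash007/FRED-V2 | Tools.py | categorize_extracted_links
-- ===== SOURCE A (Python) =====
-- def categorize_extracted_links(links: list, source_url: str) -> dict:
--     """Categorize extracted links into appropriate categories."""
--     categorized = {
--         "academic_papers": [],
--         "related_articles": [],
--         "official_sources": [],
--         "news_articles": [],
--         "documentation": [],
--         "forums": [],
--         "social_media": [],
--         "video_transcripts": []
--     }
--
--     for link in links:
--         try:
--             link_lower = link.lower()
--
--             # Academic papers
--             if any(domain in link_lower for domain in ['arxiv.org', 'scholar.google', 'researchgate', 'pubmed', 'doi.org']):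
--                 categorized["academic_papers"].append(link)
--
--             # Social media
--             elif any(domain in link_lower for domain in ['reddit.com', 'facebook.com', 'linkedin.com']):
--                 categorized["social_media"].append(link)
--
--             # Video platforms
--             elif any(domain in link_lower for domain in ['youtube.com', 'vimeo.com']):
--                 categorized["video_transcripts"].append(link)
--
--             # Forums
--             elif any(domain in link_lower for domain in ['stackoverflow.com', 'stackexchange.com', 'forum']):
--                 categorized["forums"].append(link)
--
--             # News
--             elif any(domain in link_lower for domain in ['news', 'bbc.com', 'cnn.com', 'reuters.com', 'npr.org']):
--                 categorized["news_articles"].append(link)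
--
--             # Official sources
--             elif any(domain in link_lower for domain in ['.gov', '.edu', '.org']):
--                 categorized["official_sources"].append(link)
--
--             # Documentation
--             elif any(keyword in link_lower for keyword in ['docs', 'documentation', 'guide', 'manual', 'wiki']):
--                 categorized["documentation"].append(link)
--
--             # Default to related articles
--             else:
--                 categorized["related_articles"].append(link)
--
--         except:
--             continue
--
--     return categorized
-- ===== SOURCE B (Python) =====
-- CATEGORY_PATTERNS = [
--     ("academic_papers", ['arxiv.org', 'scholar.google', 'researchgate', 'pubmed', 'doi.org']),
--     ("social_media", ['reddit.com', 'facebook.com', 'linkedin.com']),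
--     ("video_transcripts", ['youtube.com', 'vimeo.com']),
--     ("forums", ['stackoverflow.com', 'stackexchange.com', 'forum']),
--     ("news_articles", ['news', 'bbc.com', 'cnn.com', 'reuters.com', 'npr.org']),
--     ("official_sources", ['.gov', '.edu', '.org']),
--     ("documentation", ['docs', 'documentation', 'guide', 'manual', 'wiki']),
-- ]
--
-- def _classify(link):
--     low = link.lower()
--     for cat, pats in CATEGORY_PATTERNS:
--         if any(p in low for p in pats):
--             return cat
--     return "related_articles"
--
-- def categorize_extracted_links(links: list, source_url: str) -> dict:
--     tagged = [(link, _classify(link)) for link in links]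
--     return {cat: [l for l, c in tagged if c == cat]
--             for cat in ["academic_papers", "related_articles", "official_sources",
--                         "news_articles", "documentation", "forums", "social_media",
--                         "video_transcripts"]}
-- ===== Notes on version B (the rewrite author's own statement) =====
-- stated objective: idiomatic
-- what changed: A mutates a pre-seeded dict inside the loop through an if/elif chain; B tags each link once via an ordered (category, patterns) table scan and then builds every bucket by filtering the tagged list (classify-then-group), dropping the try/except that can never fire on string links.
import Mathlib
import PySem

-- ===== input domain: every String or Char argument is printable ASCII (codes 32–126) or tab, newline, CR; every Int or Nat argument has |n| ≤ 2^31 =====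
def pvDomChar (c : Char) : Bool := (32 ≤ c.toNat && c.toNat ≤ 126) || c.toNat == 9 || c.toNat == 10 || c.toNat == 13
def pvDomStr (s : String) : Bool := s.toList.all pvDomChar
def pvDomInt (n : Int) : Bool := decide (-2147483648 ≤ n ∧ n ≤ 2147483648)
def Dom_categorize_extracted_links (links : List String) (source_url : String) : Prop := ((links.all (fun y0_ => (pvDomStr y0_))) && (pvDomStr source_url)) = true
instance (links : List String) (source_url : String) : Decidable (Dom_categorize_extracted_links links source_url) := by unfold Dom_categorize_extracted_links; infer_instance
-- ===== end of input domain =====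

-- B replaces A's in-loop dict mutation by a classify-then-group decomposition: each link is
-- tagged once with its category via an ordered (category, patterns) table, and each bucket is
-- built by filtering the tagged list (objective: idiomatic/simpler; same asymptotic cost).
-- A's try/except never fires on string inputs, so B omits it.

-- ===== PORT A =====
def categorize_extracted_links (links : List String) (source_url : String) : List (String × List String) :=
  let categorized : PySem.Dict String (List String) :=
    PySem.Dict.ofList [("academic_papers", []), ("related_articles", []), ("official_sources", []),
      ("news_articles", []), ("documentation", []), ("forums", []), ("social_media", []),
      ("video_transcripts", [])]
  let categorized := links.foldl (fun d link =>
    let link_lower := PySem.Str.lower link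
    if ["arxiv.org", "scholar.google", "researchgate", "pubmed", "doi.org"].any
        (fun dom => PySem.Str.isIn dom link_lower) then
      d.modify "academic_papers" [] (· ++ [link])
    else if ["reddit.com", "facebook.com", "linkedin.com"].any
        (fun dom => PySem.Str.isIn dom link_lower) then
      d.modify "social_media" [] (· ++ [link])
    else if ["youtube.com", "vimeo.com"].any
        (fun dom => PySem.Str.isIn dom link_lower) then
      d.modify "video_transcripts" [] (· ++ [link])
    else if ["stackoverflow.com", "stackexchange.com", "forum"].any
        (fun dom => PySem.Str.isIn dom link_lower) then
      d.modify "forums" [] (· ++ [link])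
    else if ["news", "bbc.com", "cnn.com", "reuters.com", "npr.org"].any
        (fun dom => PySem.Str.isIn dom link_lower) then
      d.modify "news_articles" [] (· ++ [link])
    else if [".gov", ".edu", ".org"].any
        (fun dom => PySem.Str.isIn dom link_lower) then
      d.modify "official_sources" [] (· ++ [link])
    else if ["docs", "documentation", "guide", "manual", "wiki"].any
        (fun keyword => PySem.Str.isIn keyword link_lower) then
      d.modify "documentation" [] (· ++ [link])
    else
      d.modify "related_articles" [] (· ++ [link])) categorized
  categorized.items

-- ===== PORT B =====
def pvCategoryPatterns : List (String × List String) :=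
  [("academic_papers", ["arxiv.org", "scholar.google", "researchgate", "pubmed", "doi.org"]),
   ("social_media", ["reddit.com", "facebook.com", "linkedin.com"]),
   ("video_transcripts", ["youtube.com", "vimeo.com"]),
   ("forums", ["stackoverflow.com", "stackexchange.com", "forum"]),
   ("news_articles", ["news", "bbc.com", "cnn.com", "reuters.com", "npr.org"]),
   ("official_sources", [".gov", ".edu", ".org"]),
   ("documentation", ["docs", "documentation", "guide", "manual", "wiki"])]

def pvClassifyGo (low : String) : List (String × List String) → String
  | [] => "related_articles"
  | (cat, pats) :: rest =>
    if pats.any (fun p => PySem.Str.isIn p low) then cat else pvClassifyGo low rest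

def pvClassify (link : String) : String :=
  pvClassifyGo (PySem.Str.lower link) pvCategoryPatterns

def categorize_extracted_links_alt (links : List String) (source_url : String) : List (String × List String) :=
  let tagged := links.map (fun link => (link, pvClassify link))
  ["academic_papers", "related_articles", "official_sources", "news_articles",
   "documentation", "forums", "social_media", "video_transcripts"].map
    (fun cat => (cat, (tagged.filter (fun lc => lc.2 == cat)).map (·.1)))

-- ===== PRECONDITION & SPEC =====
def Spec_categorize_extracted_links (links : List String) (source_url : String) (out : List (String × List String)) : Prop := out = categorize_extracted_links_alt links source_url
instance (links : List String) (source_url : String) (out : List (String × List String)) : Decidable (Spec_categorize_extracted_links links source_url out) := by unfold Spec_categorize_extracted_links; infer_instance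

-- ===== CLAIM (what is proved, stated in full; the proofs are below) =====
def Claim_equal_categorize_extracted_links : Prop := ∀ (links : List String) (source_url : String), Dom_categorize_extracted_links links source_url → Spec_categorize_extracted_links links source_url (categorize_extracted_links links source_url)

-- ===== LEMMAS AND PROOFS =====

-- A's loop body is exactly "append the link to the bucket that pvClassify names".
theorem pvStep_eq (d : PySem.Dict String (List String)) (link : String) :
    (let link_lower := PySem.Str.lower link
     if ["arxiv.org", "scholar.google", "researchgate", "pubmed", "doi.org"].any
        (fun dom => PySem.Str.isIn dom link_lower) then
      d.modify "academic_papers" [] (· ++ [link])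
    else if ["reddit.com", "facebook.com", "linkedin.com"].any
        (fun dom => PySem.Str.isIn dom link_lower) then
      d.modify "social_media" [] (· ++ [link])
    else if ["youtube.com", "vimeo.com"].any
        (fun dom => PySem.Str.isIn dom link_lower) then
      d.modify "video_transcripts" [] (· ++ [link])
    else if ["stackoverflow.com", "stackexchange.com", "forum"].any
        (fun dom => PySem.Str.isIn dom link_lower) then
      d.modify "forums" [] (· ++ [link])
    else if ["news", "bbc.com", "cnn.com", "reuters.com", "npr.org"].any
        (fun dom => PySem.Str.isIn dom link_lower) then
      d.modify "news_articles" [] (· ++ [link])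
    else if [".gov", ".edu", ".org"].any
        (fun dom => PySem.Str.isIn dom link_lower) then
      d.modify "official_sources" [] (· ++ [link])
    else if ["docs", "documentation", "guide", "manual", "wiki"].any
        (fun keyword => PySem.Str.isIn keyword link_lower) then
      d.modify "documentation" [] (· ++ [link])
    else
      d.modify "related_articles" [] (· ++ [link])) =
    d.modify (pvClassify link) [] (· ++ [link]) := by
  simp only [pvClassify, pvCategoryPatterns, pvClassifyGo]
  split_ifs <;> rfl

theorem pvClassify_mem (link : String) :
    pvClassify link ∈ ["academic_papers", "related_articles", "official_sources", "news_articles",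
      "documentation", "forums", "social_media", "video_transcripts"] := by
  simp only [pvClassify, pvCategoryPatterns, pvClassifyGo]
  split_ifs <;> simp

theorem pvUpdate_keys_eq {α : Type} [BEq α] [LawfulBEq α] (s xs : List α)
    (h : ∀ x ∈ xs, x ∈ s) : PySem.Set.update s xs = s := by
  rw [PySem.Set.update_eq_append_filter]
  have hf : (PySem.Set.ofList xs).filter (fun y => !(PySem.Set.contains s y)) = [] := by
    simp only [List.filter_eq_nil_iff, Bool.not_eq_true]
    intro y hy
    have hys : y ∈ s := h y ((PySem.Set.mem_ofList xs y).mp hy)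
    simp [PySem.Set.contains_eq_listContains, hys]
  rw [hf, List.append_nil]

theorem pvFold_eq (links : List String) (d : PySem.Dict String (List String)) :
    links.foldl (fun d link => d.modify (pvClassify link) [] (· ++ [link])) d =
    (links.map (fun l => (pvClassify l, l))).foldl (fun d p => d.modify p.1 [] (· ++ [p.2])) d := by
  rw [List.foldl_map]

-- ===== VERDICT (by name: the statement is the Claim_ definition above) =====
theorem categorize_extracted_links_spec : Claim_equal_categorize_extracted_links := by
  intro links source_url _
  show _ = _
  unfold categorize_extracted_links categorize_extracted_links_alt
  simp only [pvStep_eq, pvFold_eq]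
  set D0 : PySem.Dict String (List String) :=
    PySem.Dict.ofList [("academic_papers", []), ("related_articles", []), ("official_sources", []),
      ("news_articles", []), ("documentation", []), ("forums", []), ("social_media", []),
      ("video_transcripts", [])] with hD0
  set L := links.map (fun l => (pvClassify l, l)) with hL
  set df := L.foldl (fun d p => d.modify p.1 [] (· ++ [p.2])) D0 with hdf
  have hkeys : df.keys = ["academic_papers", "related_articles", "official_sources",
      "news_articles", "documentation", "forums", "social_media", "video_transcripts"] := by
    rw [hdf, PySem.Dict.keys_foldl_modify_key]
    have h1 : D0.keys = ["academic_papers", "related_articles", "official_sources",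
        "news_articles", "documentation", "forums", "social_media", "video_transcripts"] := by decide
    rw [h1]
    apply pvUpdate_keys_eq
    intro x hx
    rw [hL] at hx
    simp only [List.map_map, List.mem_map] at hx
    obtain ⟨l, _, rfl⟩ := hx
    exact pvClassify_mem l
  have hnodup : df.keys.Nodup := by rw [hkeys]; decide
  have hD0getD : ∀ k : String, D0.getD k [] = [] := by
    intro k
    rw [show D0 = PySem.Dict.mk [("academic_papers", []), ("related_articles", []), ("official_sources", []),
      ("news_articles", []), ("documentation", []), ("forums", []), ("social_media", []),
      ("video_transcripts", [])] from by decide]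
    simp only [PySem.Dict.getD_eq_get?_getD, PySem.Dict.get?_mk_cons]
    split_ifs <;> rfl
  rw [PySem.Dict.items_eq_map_keys df hnodup [], hkeys]
  apply List.map_congr_left
  intro k hk
  have hb : df.getD k [] = D0.getD k [] ++ (L.filter (fun p => p.1 == k)).map (·.2) := by
    rw [hdf]; exact PySem.Dict.getD_foldl_modify_append ..
  rw [hb, hD0getD, hL]
  simp [List.filter_map, List.map_map, Function.comp_def]
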